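-- pv_equiv track=rewrite | github.com/wh-jung0522/AlgorithmStudy | 1. Hash/1_UnfinishedAthlete.py | make_hash_dictionary
-- ===== SOURCE A (Python) =====
-- def make_hash_dictionary(list):
--     Hash_dict = {}
--     for element in list:
--         value = Hash_dict.get(element)
--         if(value != None):
--             value += 1
--         else:
--             value = 1
--         Hash_dict[element] = value
--     return Hash_dict
-- ===== SOURCE B (Python) =====
-- def make_hash_dictionary(list):
--     # Dict comprehension over the original list: each key is recomputed by a
--     # full-list count; duplicate keys overwrite with the same value, so key
--     # order matches first-appearance order.
--     return {e: list.count(e) for e in list}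
-- ===== Notes on version B (the rewrite author's own statement) =====
-- stated objective: idiomatic
-- what changed: Replaces A's single accumulating pass (get-then-update per element) with a dict comprehension that recomputes each key's value by a full list.count scan.
import Mathlib
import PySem

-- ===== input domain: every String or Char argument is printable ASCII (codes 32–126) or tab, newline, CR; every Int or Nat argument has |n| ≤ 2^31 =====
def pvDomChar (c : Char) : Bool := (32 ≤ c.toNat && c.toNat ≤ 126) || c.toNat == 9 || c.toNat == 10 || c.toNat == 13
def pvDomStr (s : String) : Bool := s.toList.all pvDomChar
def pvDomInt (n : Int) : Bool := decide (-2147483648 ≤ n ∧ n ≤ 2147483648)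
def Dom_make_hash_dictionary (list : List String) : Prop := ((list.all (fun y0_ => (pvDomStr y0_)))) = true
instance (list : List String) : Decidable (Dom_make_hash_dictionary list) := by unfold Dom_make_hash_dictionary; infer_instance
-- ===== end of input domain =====

-- B replaces A's single accumulating counting pass with a dict comprehension
-- that recomputes each key's value by a full list.count scan (idiomatic, not faster).


-- ===== PORT A =====
-- for element in list: value = d.get(element); value = value+1 if not None else 1; d[element] = value
def make_hash_dictionary (list : List String) : List (String × Int) :=
  (list.foldl
    (fun (d : PySem.Dict String Int) element =>
      let value : Int :=
        match d.get? element with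
        | some v => v + 1
        | none => 1
      d.insert element value)
    PySem.Dict.empty).items

-- ===== PORT B =====
-- {e: list.count(e) for e in list}
def make_hash_dictionary_alt (list : List String) : List (String × Int) :=
  (list.foldl
    (fun (d : PySem.Dict String Int) e => d.insert e ((PySem.List.count list e : Int)))
    PySem.Dict.empty).items

-- ===== PRECONDITION & SPEC =====
def Spec_make_hash_dictionary (list : List String) (out : List (String × Int)) : Prop := out = make_hash_dictionary_alt list
instance (list : List String) (out : List (String × Int)) : Decidable (Spec_make_hash_dictionary list out) := by unfold Spec_make_hash_dictionary; infer_instance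

-- ===== CLAIM (what is proved, stated in full; the proofs are below) =====
def Claim_equal_make_hash_dictionary : Prop := ∀ (list : List String), Dom_make_hash_dictionary list → Spec_make_hash_dictionary list (make_hash_dictionary list)

-- ===== LEMMAS AND PROOFS =====

-- A's loop body is exactly the standard counter step.
theorem pvA_eq_counter (list : List String) :
    make_hash_dictionary list = (PySem.Dict.counter list).items := by
  unfold make_hash_dictionary
  rw [← PySem.Dict.foldl_insert_getD_add_one_eq_counter]
  congr 1
  apply PySem.List.foldl_congr_mem
  intro d e _
  simp only [PySem.Dict.getD_eq_get?_getD]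
  cases d.get? e <;> simp

-- Inserting a constant-per-key value for every element of l builds
-- the first-occurrence keys, each paired with f of the key.
theorem pvB_items (l : List String) (f : String → Int) :
    (l.foldl (fun (d : PySem.Dict String Int) e => d.insert e (f e)) PySem.Dict.empty).items
      = (PySem.Set.ofList l).map (fun k => (k, f k)) := by
  induction l using List.reverseRecOn with
  | nil => rfl
  | append_singleton l x ih =>
    rw [List.foldl_append, List.foldl_cons, List.foldl_nil,
        PySem.Set.ofList_append_singleton, PySem.Dict.items_insert]
    by_cases hx : x ∈ PySem.Set.ofList l
    · have hc : (l.foldl (fun (d : PySem.Dict String Int) e => d.insert e (f e)) PySem.Dict.empty).contains x = true := by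
        rw [PySem.Dict.contains_iff_mem_keys, PySem.Dict.keys_foldl_insert]
        simpa [PySem.Dict.keys_empty, PySem.Set.update_empty] using hx
      rw [hc, if_pos rfl, ih, PySem.Set.add_of_mem hx, List.map_map]
      apply List.map_congr_left
      intro k _
      by_cases hk : k = x <;> simp [hk]
    · have hc : (l.foldl (fun (d : PySem.Dict String Int) e => d.insert e (f e)) PySem.Dict.empty).contains x = false := by
        rw [Bool.eq_false_iff, Ne, PySem.Dict.contains_iff_mem_keys, PySem.Dict.keys_foldl_insert]
        simpa [PySem.Dict.keys_empty, PySem.Set.update_empty] using hx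
      rw [hc, if_neg (by simp), ih, PySem.Set.add_of_not_mem hx, List.map_append, List.map_singleton]

-- ===== VERDICT (by name: the statement is the Claim_ definition above) =====
theorem make_hash_dictionary_spec : Claim_equal_make_hash_dictionary := by
  intro list _
  show make_hash_dictionary list = make_hash_dictionary_alt list
  rw [pvA_eq_counter, PySem.Dict.items_counter]
  unfold make_hash_dictionary_alt
  rw [pvB_items]
  simp [PySem.List.count_eq]
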